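-- pv_equiv track=rewrite | github.com/SynMac222/amazon-OA | countmoveleftandright.py | countMoveleft
-- ===== SOURCE A (Python) =====
-- def countMoveleft(nums,target):
--     re = 0
--     last = 0
--     for i in range(len(nums)):
--
--         if nums[i] == target:
--             re +=i-last
--             last+=1
--     return re
-- ===== SOURCE B (Python) =====
-- def countMoveleft(nums, target):
--     idxs = [i for i, x in enumerate(nums) if x == target]
--     c = len(idxs)
--     return sum(idxs) - c * (c - 1) // 2
-- ===== Notes on version B (the rewrite author's own statement) =====
-- stated objective: simpler
-- what changed: Replaces the running 'last' accumulator loop by collecting the matching indices and using the closed-form triangular-number formula sum(idxs) - c*(c-1)//2.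
import Mathlib
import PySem

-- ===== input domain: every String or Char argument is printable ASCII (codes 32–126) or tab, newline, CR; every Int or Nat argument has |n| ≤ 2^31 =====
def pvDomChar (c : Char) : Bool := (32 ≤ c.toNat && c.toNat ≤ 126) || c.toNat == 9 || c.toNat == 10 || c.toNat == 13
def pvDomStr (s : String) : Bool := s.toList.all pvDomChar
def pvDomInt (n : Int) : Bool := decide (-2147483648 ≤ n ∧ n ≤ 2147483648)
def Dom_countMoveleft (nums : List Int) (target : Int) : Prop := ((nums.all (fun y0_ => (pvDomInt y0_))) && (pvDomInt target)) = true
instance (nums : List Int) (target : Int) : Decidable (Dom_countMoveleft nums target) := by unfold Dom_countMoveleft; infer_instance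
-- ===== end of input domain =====

-- B replaces A's running 'last' accumulator by collecting the matching indices and
-- applying the triangular-number closed form sum(idxs) - c*(c-1)//2 (objective: simpler).

-- ===== PORT A =====
-- for i in range(len(nums)): if nums[i] == target: re += i - last; last += 1
def countMoveleft (nums : List Int) (target : Int) : Int :=
  ((PySem.List.pyRange 0 (nums.length : Int) 1).foldl
    (fun (st : Int × Int) i =>
      if PySem.List.pyGetD nums i 0 == target then (st.1 + i - st.2, st.2 + 1) else st)
    (0, 0)).1

-- ===== PORT B =====
-- idxs = [i for i, x in enumerate(nums) if x == target]; c = len(idxs); sum(idxs) - c*(c-1)//2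
def countMoveleft_alt (nums : List Int) (target : Int) : Int :=
  let idxs := ((PySem.List.enumerate nums).filter (fun p => p.2 == target)).map (fun p => p.1)
  let c : Int := (idxs.length : Int)
  idxs.sum - PySem.Int.floordiv (c * (c - 1)) 2

-- ===== PRECONDITION & SPEC =====
def Spec_countMoveleft (nums : List Int) (target : Int) (out : Int) : Prop := out = countMoveleft_alt nums target
instance (nums : List Int) (target : Int) (out : Int) : Decidable (Spec_countMoveleft nums target out) := by unfold Spec_countMoveleft; infer_instance

-- ===== CLAIM (what is proved, stated in full; the proofs are below) =====
def Claim_equal_countMoveleft : Prop := ∀ (nums : List Int) (target : Int), Dom_countMoveleft nums target → Spec_countMoveleft nums target (countMoveleft nums target)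

-- ===== LEMMAS AND PROOFS =====

/-- Triangular number 0 + 1 + ... + (n-1), as an Int. -/
def triI : Nat → Int
  | 0 => 0
  | n + 1 => triI n + n

theorem two_mul_triI (n : Nat) : 2 * triI n = (n : Int) * ((n : Int) - 1) := by
  induction n with
  | zero => simp [triI]
  | succ m ih => simp only [triI]; push_cast; ring_nf; ring_nf at ih; omega

theorem floordiv_eq_triI (n : Nat) :
    PySem.Int.floordiv ((n : Int) * ((n : Int) - 1)) 2 = triI n := by
  rw [PySem.Int.floordiv_eq_ediv_of_pos (by omega), ← two_mul_triI n,
    Int.mul_ediv_cancel_left _ (by omega)]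

/-- The loop of A computes, from state (re, last), the sum of matching indices minus
    the arithmetic progression last, last+1, ..., last+c-1. -/
theorem foldl_loop (target : Int) (ps : List (Int × Int)) (re last : Int) :
    ps.foldl
      (fun (st : Int × Int) p =>
        if p.2 == target then (st.1 + p.1 - st.2, st.2 + 1) else st)
      (re, last)
    = (re + (((ps.filter (fun p => p.2 == target)).map (fun p => p.1)).sum
        - (((ps.countP (fun p => p.2 == target)) : Int) * last
            + triI (ps.countP (fun p => p.2 == target)))),
       last + (ps.countP (fun p => p.2 == target) : Int)) := by
  induction ps generalizing re last with
  | nil => simp [triI]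
  | cons hd tl ih =>
    by_cases h : hd.2 == target
    · simp only [List.foldl_cons, List.filter_cons, List.countP_cons, h, if_pos,
        List.map_cons, List.sum_cons, ih]
      apply Prod.ext <;> simp only [triI] <;> push_cast <;> ring
    · simp only [List.foldl_cons, List.filter_cons, List.countP_cons, h,
        Bool.false_eq_true, ih]
      simp

theorem length_filter_map (nums : List Int) (target : Int) :
    (((PySem.List.enumerate nums).filter (fun p => p.2 == target)).map
        (fun p => p.1)).length
      = (PySem.List.enumerate nums).countP (fun p => p.2 == target) := by
  simp [List.countP_eq_length_filter]

-- ===== VERDICT (by name: the statement is the Claim_ definition above) =====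
theorem countMoveleft_spec : Claim_equal_countMoveleft := by
  intro nums target _
  show countMoveleft nums target = countMoveleft_alt nums target
  unfold countMoveleft countMoveleft_alt
  have he := PySem.List.enumerate_eq_map_pyRange nums 0
  have hlen : PySem.List.len nums = (nums.length : Int) := by
    simp [PySem.List.len]
  rw [hlen] at he
  rw [show ((PySem.List.pyRange 0 (nums.length : Int) 1).foldl
      (fun (st : Int × Int) i =>
        if PySem.List.pyGetD nums i 0 == target then (st.1 + i - st.2, st.2 + 1) else st)
      (0, 0))
    = ((PySem.List.enumerate nums).foldl
      (fun (st : Int × Int) p =>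
        if p.2 == target then (st.1 + p.1 - st.2, st.2 + 1) else st)
      (0, 0)) from by rw [he, List.foldl_map]]
  rw [foldl_loop]
  simp only [length_filter_map, floordiv_eq_triI]
  ring
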